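-- pv_equiv track=rewrite | github.com/HWI813/daily-coding | day8.py | best_compression
-- ===== SOURCE A (Python) =====
-- from itertools import groupby
--
-- def compress_length(s):
--     return sum(len(k) + len(str(len(list(g)))) for k, g in groupby(s))
--
-- def best_compression(s):
--     min_len = compress_length(s)
--     for i in range(len(s)):
--         for repl in 'abcdefghijklmnopqrstuvwxyz':
--             if s[i] != repl:
--                 temp = s[:i] + repl + s[i+1:]
--                 min_len = min(min_len, compress_length(temp))
--     return min_len
-- ===== SOURCE B (Python) =====
-- def best_compression(s):
--     # Delta method: build the run-length encoding once; a single-character change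
--     # only alters the run it falls in and at most its two neighbouring runs, so
--     # each candidate cost is base - (old local cost) + (cost of the re-merged
--     # local window), computed in O(1)-sized windows: O(26*n) instead of O(26*n^2).
--     runs = []
--     for ch in s:
--         if runs and runs[-1][0] == ch:
--             runs[-1] = (ch, runs[-1][1] + 1)
--         else:
--             runs.append((ch, 1))
--
--     def cost(rs):
--         return sum(1 + len(str(L)) for _, L in rs)
--
--     base = cost(runs)
--     best = base
--     prevs = [None] + runs[:-1]
--     nxts = runs[1:] + [None]
--     for (k, L), prev, nxt in zip(runs, prevs, nxts):
--         side = [x for x in (prev, nxt) if x is not None]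
--         oldc = cost(side) + 1 + len(str(L))
--         for p in range(L):
--             for c in "abcdefghijklmnopqrstuvwxyz":
--                 if c != k:
--                     pieces = ([] if prev is None else [prev])
--                     pieces += [(k, p), (c, 1), (k, L - 1 - p)]
--                     pieces += ([] if nxt is None else [nxt])
--                     merged = []
--                     for ch2, l2 in pieces:
--                         if l2 == 0:
--                             continue
--                         if merged and merged[-1][0] == ch2:
--                             merged[-1] = (ch2, merged[-1][1] + l2)
--                         else:
--                             merged.append((ch2, l2))
--                     best = min(best, base - oldc + cost(merged))
--     return best
-- ===== Notes on version B (the rewrite author's own statement) =====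
-- stated objective: faster
-- what changed: B builds the run-length encoding once and scores each candidate single-character change by an O(1) local delta (re-merging only the affected run and its two neighbours) instead of A's full re-encoding of every modified string, dropping the complexity from O(26*n^2) to O(26*n).
import Mathlib
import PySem

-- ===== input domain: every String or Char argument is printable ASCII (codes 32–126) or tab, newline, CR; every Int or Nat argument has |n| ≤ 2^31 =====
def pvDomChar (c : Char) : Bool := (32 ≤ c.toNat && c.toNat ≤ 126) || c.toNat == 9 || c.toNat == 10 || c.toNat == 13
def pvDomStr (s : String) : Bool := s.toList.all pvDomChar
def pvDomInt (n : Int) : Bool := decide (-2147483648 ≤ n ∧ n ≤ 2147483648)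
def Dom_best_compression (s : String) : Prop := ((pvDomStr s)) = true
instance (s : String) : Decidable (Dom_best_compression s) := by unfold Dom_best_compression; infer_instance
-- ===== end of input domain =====

-- B builds the run-length encoding once and scores each single-character change by a
-- local O(1)-window delta (only the run containing the change and its two neighbours
-- can differ), instead of A's full re-encoding of every modified string; the timing
-- run measured B faster (O(26·n) vs A's O(26·n²)).

-- ===== PORT A =====

-- len(str(n)) for a run length n (str(n) = PySem.Int.toStr; its char count, via toChars)
def pvStrLen (n : Nat) : Int := ((PySem.Int.toChars (n : Int)).length : Int)

-- itertools.groupby s: the run lengths of s, left to right (state: current key, current count)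
def pvGroupLens : Option Char → Nat → List Char → List Nat
  | none, _, [] => []
  | some _, n, [] => [n]
  | none, _, c :: rest => pvGroupLens (some c) 1 rest
  | some p, n, c :: rest =>
      if c = p then pvGroupLens (some p) (n + 1) rest
      else n :: pvGroupLens (some c) 1 rest

-- sum(len(k) + len(str(len(list(g)))) for k, g in groupby(s))  (len(k) = 1: keys are chars)
def compress_length (l : List Char) : Int :=
  ((pvGroupLens none 0 l).map (fun n => (1 : Int) + pvStrLen n)).sum

def pvAlpha : List Char := "abcdefghijklmnopqrstuvwxyz".toList

def best_compression (s : String) : Int :=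
  let l := s.toList
  (PySem.List.pyRange 0 (l.length : Int) 1).foldl (fun m i =>
    pvAlpha.foldl (fun m repl =>
      match PySem.List.pyGet? l i with
      | some ch =>
          if ch ≠ repl then
            min m (compress_length
              (PySem.List.slice l none (some i) ++ [repl] ++
               PySem.List.slice l (some (i + 1)) none))
          else m
      | none => m) m) (compress_length l)

-- ===== PORT B =====

-- the run-building loop body: append (ch,1) or bump the last run's count
def pvPush (rs : List (Char × Nat)) (ch : Char) : List (Char × Nat) :=
  match rs.getLast? with
  | some (d, n) => if d = ch then rs.dropLast ++ [(ch, n + 1)] else rs ++ [(ch, 1)]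
  | none => [(ch, 1)]

-- the window re-merge loop body: skip empty pieces, merge with the last run or append
def pvPushRun (rs : List (Char × Nat)) (x : Char × Nat) : List (Char × Nat) :=
  if x.2 = 0 then rs
  else
    match rs.getLast? with
    | some (d, n) => if d = x.1 then rs.dropLast ++ [(x.1, n + x.2)] else rs ++ [x]
    | none => [x]

-- cost(rs) = sum(1 + len(str(L)) for _, L in rs)
def pvCost (rs : List (Char × Nat)) : Int := (rs.map (fun p => (1 : Int) + pvStrLen p.2)).sum

-- [x for x in (prev, nxt) if x is not None], one element at a time
def pvOptList : Option (Char × Nat) → List (Char × Nat)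
  | none => []
  | some x => [x]

def best_compression_alt (s : String) : Int :=
  let t := s.toList
  let runs := t.foldl pvPush []
  let base := pvCost runs
  let prevs : List (Option (Char × Nat)) := none :: runs.dropLast.map some
  let nxts : List (Option (Char × Nat)) := runs.tail.map some ++ [none]
  (runs.zip (prevs.zip nxts)).foldl (fun best tr =>
    let k := tr.1.1
    let L := tr.1.2
    let prev := tr.2.1
    let nxt := tr.2.2
    let oldc := pvCost (pvOptList prev ++ pvOptList nxt) + 1 + pvStrLen L
    (List.range L).foldl (fun best p =>
      pvAlpha.foldl (fun best c =>
        if c ≠ k then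
          let pieces := pvOptList prev ++ [(k, p), (c, 1), (k, L - 1 - p)] ++ pvOptList nxt
          let merged := pieces.foldl pvPushRun []
          min best (base - oldc + pvCost merged)
        else best) best) best) base

-- ===== PRECONDITION & SPEC =====
def Spec_best_compression (s : String) (out : Int) : Prop := out = best_compression_alt s
instance (s : String) (out : Int) : Decidable (Spec_best_compression s out) := by unfold Spec_best_compression; infer_instance

-- ===== CLAIM (what is proved, stated in full; the proofs are below) =====
def Claim_equal_best_compression : Prop := ∀ (s : String), Dom_best_compression s → Spec_best_compression s (best_compression s)

-- ===== LEMMAS AND PROOFS =====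

-- ---- basic run-list notions (proof-only helpers) ----

-- canonical run list: positive lengths, adjacent runs have distinct characters
def pvCanon (rs : List (Char × Nat)) : Prop :=
  (∀ p ∈ rs, 0 < p.2) ∧ rs.IsChain (fun a b => a.1 ≠ b.1)

-- the string a run list denotes
def pvFlat (rs : List (Char × Nat)) : List Char :=
  rs.flatMap (fun p => List.replicate p.2 p.1)

theorem pvFlat_append (a b : List (Char × Nat)) : pvFlat (a ++ b) = pvFlat a ++ pvFlat b := by
  simp [pvFlat]

theorem pvCost_append (a b : List (Char × Nat)) : pvCost (a ++ b) = pvCost a + pvCost b := by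
  simp [pvCost]

-- ---- pvPushRun invariants ----

theorem pvPushRun_cons_cons (a b : Char × Nat) (t : List (Char × Nat)) (x : Char × Nat)
    (hx : x.2 ≠ 0) : pvPushRun (a :: b :: t) x = a :: pvPushRun (b :: t) x := by
  simp only [pvPushRun, if_neg hx, List.getLast?_cons_cons]
  match h : (b :: t).getLast? with
  | some (d, n) =>
    simp only []
    split_ifs <;> simp [List.dropLast]
  | none => simp at h

theorem pvPushRun_head (b : Char × Nat) (t : List (Char × Nat)) (x : Char × Nat) :
    (pvPushRun (b :: t) x).head?.map Prod.fst = some b.1 := by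
  by_cases hx : x.2 = 0
  · simp [pvPushRun, hx]
  · cases t with
    | nil =>
      simp only [pvPushRun, if_neg hx, List.getLast?_singleton]
      by_cases h : b.1 = x.1 <;> simp [h]
    | cons c t' => rw [pvPushRun_cons_cons _ _ _ _ hx]; simp

theorem pvPushRun_flat (rs : List (Char × Nat)) (x : Char × Nat) :
    pvFlat (pvPushRun rs x) = pvFlat rs ++ List.replicate x.2 x.1 := by
  by_cases hx : x.2 = 0
  · simp [pvPushRun, hx, pvFlat]
  · induction rs with
    | nil => simp [pvPushRun, if_neg hx, pvFlat]
    | cons a t ih =>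
      cases t with
      | nil =>
        simp only [pvPushRun, if_neg hx, List.getLast?_singleton]
        by_cases h : a.1 = x.1
        · simp [pvFlat, h]
        · simp [h, pvFlat]
      | cons b t' =>
        rw [pvPushRun_cons_cons _ _ _ _ hx]
        simp [pvFlat] at ih ⊢
        simp [ih]

theorem pvPushRun_canon (rs : List (Char × Nat)) (x : Char × Nat) (h : pvCanon rs) :
    pvCanon (pvPushRun rs x) := by
  by_cases hx : x.2 = 0
  · simpa [pvPushRun, hx] using h
  · induction rs with
    | nil =>
      simp only [pvPushRun, if_neg hx]
      exact ⟨by simpa [Nat.pos_of_ne_zero] using Nat.pos_of_ne_zero hx, by simp⟩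
    | cons a t ih =>
      cases t with
      | nil =>
        simp only [pvPushRun, if_neg hx, List.getLast?_singleton]
        by_cases hd : a.1 = x.1
        · refine ⟨?_, by simp [if_pos hd]⟩
          simp [if_pos hd]
          have := h.1 a (by simp)
          omega
        · refine ⟨?_, ?_⟩
          · simp [if_neg hd]
            exact ⟨h.1 a (by simp), Nat.pos_of_ne_zero hx⟩
          · simp only [if_neg hd]
            refine List.IsChain.cons (by simp) ?_
            intro y hy
            simp at hy
            subst hy
            exact fun e => hd e
      | cons b t' =>
        rw [pvPushRun_cons_cons _ _ _ _ hx]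
        have htail : pvCanon (b :: t') :=
          ⟨fun p hp => h.1 p (by simp [hp]), (List.isChain_cons.mp h.2).2⟩
        have hres := ih htail
        refine ⟨?_, ?_⟩
        · intro p hp
          rcases List.mem_cons.mp hp with rfl | hp'
          · exact h.1 p (by simp)
          · exact hres.1 p hp'
        · refine List.IsChain.cons hres.2 ?_
          intro y hy
          have hhd := pvPushRun_head b t' x
          have : y.1 = b.1 := by
            rw [Option.mem_def] at hy
            rw [hy] at hhd
            simpa using hhd
          rw [this]
          exact (List.isChain_cons.mp h.2).1 b (by simp)

theorem foldl_pushRun_flat (ps : List (Char × Nat)) : ∀ (rs : List (Char × Nat)),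
    pvFlat (ps.foldl pvPushRun rs) = pvFlat rs ++ pvFlat ps := by
  induction ps with
  | nil => intro rs; simp [pvFlat]
  | cons x t ih =>
    intro rs
    simp only [List.foldl_cons, ih, pvPushRun_flat]
    simp [pvFlat]

theorem foldl_pushRun_canon (ps : List (Char × Nat)) : ∀ (rs : List (Char × Nat)),
    pvCanon rs → pvCanon (ps.foldl pvPushRun rs) := by
  induction ps with
  | nil => intro rs h; simpa using h
  | cons x t ih => intro rs h; exact ih _ (pvPushRun_canon rs x h)

theorem pvPush_eq_pushRun (rs : List (Char × Nat)) (ch : Char) :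
    pvPush rs ch = pvPushRun rs (ch, 1) := by
  simp [pvPush, pvPushRun]

theorem foldl_push_eq (l : List Char) (rs : List (Char × Nat)) :
    l.foldl pvPush rs = (l.map (fun c => (c, 1))).foldl pvPushRun rs := by
  rw [List.foldl_map]
  exact PySem.List.foldl_congr_mem _ _ _ _ (fun acc c _ => pvPush_eq_pushRun acc c)

theorem flat_map_one (l : List Char) : pvFlat (l.map (fun c => (c, 1))) = l := by
  induction l with
  | nil => rfl
  | cons c t ih => simp [pvFlat] at ih ⊢; exact ih

theorem runs_flat (l : List Char) : pvFlat (l.foldl pvPush []) = l := by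
  rw [foldl_push_eq, foldl_pushRun_flat, flat_map_one]
  rfl

theorem runs_canon (l : List Char) : pvCanon (l.foldl pvPush []) := by
  rw [foldl_push_eq]
  exact foldl_pushRun_canon _ _ ⟨by simp, by simp⟩

-- ---- compress_length of a canonical run list is its cost ----

theorem pvGroupLens_replicate (n : Nat) : ∀ (m : Nat) (c : Char) (rest : List Char),
    (∀ d, rest.head? = some d → d ≠ c) →
    pvGroupLens (some c) m (List.replicate n c ++ rest) = (m + n) :: pvGroupLens none 0 rest := by
  induction n with
  | zero =>
    intro m c rest hrest
    cases rest with
    | nil => simp [pvGroupLens]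
    | cons d t =>
      have hd : d ≠ c := hrest d rfl
      simp [pvGroupLens, hd]
  | succ n ih =>
    intro m c rest hrest
    rw [List.replicate_succ]
    simp only [List.cons_append, pvGroupLens]
    rw [ih (m + 1) c rest hrest]
    have h2 : m + 1 + n = m + (n + 1) := by omega
    rw [h2]
    simp

-- head/last characters of a run list with positive lengths, seen through pvFlat
theorem flat_head_fst (rs : List (Char × Nat)) (h : ∀ p ∈ rs, 0 < p.2) :
    (pvFlat rs).head? = rs.head?.map Prod.fst := by
  cases rs with
  | nil => rfl
  | cons a t =>
    obtain ⟨n', hn⟩ : ∃ n', a.2 = n' + 1 := by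
      have := h a (by simp); exact ⟨a.2 - 1, by omega⟩
    simp [pvFlat, hn, List.replicate_succ]

theorem flat_getLast_fst (rs : List (Char × Nat)) (h : ∀ p ∈ rs, 0 < p.2) :
    (pvFlat rs).getLast? = rs.getLast?.map Prod.fst := by
  cases hrs : rs.getLast? with
  | none =>
    have := List.getLast?_eq_none_iff.mp hrs
    subst this
    simp [pvFlat]
  | some a =>
    have hdec : rs.dropLast ++ [a] = rs := List.dropLast_append_getLast? a hrs
    have ha : 0 < a.2 := h a (by rw [← hdec]; simp)
    obtain ⟨n', hn⟩ : ∃ n', a.2 = n' + 1 := ⟨a.2 - 1, by omega⟩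
    conv_lhs => rw [← hdec]
    rw [pvFlat_append]
    have hne : pvFlat [a] ≠ [] := by simp [pvFlat, hn]
    rw [List.getLast?_append_of_ne_nil _ hne]
    simp [pvFlat, hn]
    rw [List.getLast?_eq_some_getLast (by simp), List.getLast_replicate]

theorem compress_eq_cost (rs : List (Char × Nat)) (h : pvCanon rs) :
    compress_length (pvFlat rs) = pvCost rs := by
  induction rs with
  | nil => rfl
  | cons a t ih =>
    have htail : pvCanon t := ⟨fun p hp => h.1 p (by simp [hp]), (List.isChain_cons.mp h.2).2⟩
    obtain ⟨n', hn⟩ : ∃ n', a.2 = n' + 1 := by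
      have := h.1 a (by simp); exact ⟨a.2 - 1, by omega⟩
    have hhead : ∀ d, (pvFlat t).head? = some d → d ≠ a.1 := by
      intro d hd
      rw [flat_head_fst t htail.1] at hd
      cases t with
      | nil => simp at hd
      | cons b t' =>
        simp at hd
        have := (List.isChain_cons.mp h.2).1 b (by simp)
        exact fun e => this ((hd.trans e).symm)
    have : pvFlat (a :: t) = a.1 :: (List.replicate n' a.1 ++ pvFlat t) := by
      simp [pvFlat, hn, List.replicate_succ]
    rw [this]
    simp only [compress_length, pvGroupLens]
    rw [pvGroupLens_replicate n' 1 a.1 (pvFlat t) hhead]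
    simp only [List.map_cons, List.sum_cons]
    have hrest : ((pvGroupLens none 0 (pvFlat t)).map (fun n => (1 : Int) + pvStrLen n)).sum
        = pvCost t := ih htail
    rw [hrest]
    simp only [pvCost, List.map_cons, List.sum_cons, hn]
    rw [Nat.add_comm 1 n']

-- ---- the window lemma: a one-character change is a local re-merge ----

-- per-triple quantities, exactly as port B computes them
def pvOldc (tr : (Char × Nat) × Option (Char × Nat) × Option (Char × Nat)) : Int :=
  pvCost (pvOptList tr.2.1 ++ pvOptList tr.2.2) + 1 + pvStrLen tr.1.2

def pvMerged (tr : (Char × Nat) × Option (Char × Nat) × Option (Char × Nat)) (p : Nat) (c : Char) :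
    List (Char × Nat) :=
  (pvOptList tr.2.1 ++ [(tr.1.1, p), (c, 1), (tr.1.1, tr.1.2 - 1 - p)] ++ pvOptList tr.2.2).foldl
    pvPushRun []

theorem window (R1 R2 : List (Char × Nat)) (k : Char) (L : Nat) (c : Char) (p : Nat)
    (hp : p < L) (_hc : c ≠ k) (hcanon : pvCanon (R1 ++ (k, L) :: R2)) :
    compress_length ((pvFlat (R1 ++ (k, L) :: R2)).set ((pvFlat R1).length + p) c)
      = pvCost (R1 ++ (k, L) :: R2) - pvOldc ((k, L), R1.getLast?, R2.head?)
        + pvCost (pvMerged ((k, L), R1.getLast?, R2.head?) p c) := by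
  have hchain := hcanon.2
  have hR1 : R1.dropLast ++ pvOptList R1.getLast? = R1 := by
    cases h : R1.getLast? with
    | none => simp [List.getLast?_eq_none_iff.mp h, pvOptList]
    | some a => simpa [pvOptList] using List.dropLast_append_getLast? a h
  have hR2 : pvOptList R2.head? ++ R2.tail = R2 := by
    cases R2 <;> simp [pvOptList]
  have hchainR1 : R1.IsChain (fun a b => a.1 ≠ b.1) :=
    (List.isChain_append.mp hchain).1
  have hchainR2c : ((k, L) :: R2).IsChain (fun a b => a.1 ≠ b.1) :=
    (List.isChain_append.mp hchain).2.1
  have hchainR2 : R2.IsChain (fun a b => a.1 ≠ b.1) := (List.isChain_cons.mp hchainR2c).2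
  have hmerged_canon : pvCanon (pvMerged ((k, L), R1.getLast?, R2.head?) p c) :=
    foldl_pushRun_canon _ [] ⟨by simp, by simp⟩
  have hmergedflat : pvFlat (pvMerged ((k, L), R1.getLast?, R2.head?) p c)
      = pvFlat (pvOptList R1.getLast?) ++
          (List.replicate p k ++ (c :: List.replicate (L - 1 - p) k ++
            pvFlat (pvOptList R2.head?))) := by
    unfold pvMerged
    rw [foldl_pushRun_flat]
    simp [pvFlat]
  have hmergedne : pvMerged ((k, L), R1.getLast?, R2.head?) p c ≠ [] := by
    intro e
    rw [e] at hmergedflat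
    simp [pvFlat] at hmergedflat
  -- canonicity of the reassembled run list
  have hWpos : ∀ q ∈ R1.dropLast ++ (pvMerged ((k, L), R1.getLast?, R2.head?) p c ++ R2.tail),
      0 < q.2 := by
    intro q hq
    rcases List.mem_append.mp hq with h1 | h2
    · exact hcanon.1 q (by
        have : q ∈ R1 := (List.dropLast_sublist (l := R1)).mem h1
        simp [this])
    · rcases List.mem_append.mp h2 with h3 | h4
      · exact hmerged_canon.1 q h3
      · exact hcanon.1 q (by
          have : q ∈ R2 := (List.tail_sublist R2).mem h4
          simp [this])
  have hJ2 : ∀ x ∈ (pvMerged ((k, L), R1.getLast?, R2.head?) p c).getLast?,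
      ∀ y ∈ R2.tail.head?, x.1 ≠ y.1 := by
    cases R2 with
    | nil => simp
    | cons b T' =>
      intro x hx y hy
      have hb : 0 < b.2 := hcanon.1 b (by simp)
      obtain ⟨m', hm⟩ : ∃ m', b.2 = m' + 1 := ⟨b.2 - 1, by omega⟩
      have hlast : (pvFlat (pvMerged ((k, L), R1.getLast?, (b :: T').head?) p c)).getLast?
          = some b.1 := by
        rw [hmergedflat]
        simp only [List.head?_cons, pvOptList, pvFlat, List.flatMap_cons, List.flatMap_nil,
          List.append_nil]
        rw [List.getLast?_append_of_ne_nil _ (by simp [hm]),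
          List.getLast?_append_of_ne_nil _ (by simp [hm]),
          List.getLast?_append_of_ne_nil _ (by simp [hm])]
        rw [List.getLast?_eq_some_getLast (by simp [hm]), List.getLast_replicate]
      rw [flat_getLast_fst _ hmerged_canon.1] at hlast
      rw [Option.mem_def] at hx hy
      rw [hx] at hlast
      simp at hlast
      rw [hlast]
      have := (List.isChain_cons.mp hchainR2).1
      exact this y (by simpa using hy)
  have hJ1 : ∀ x ∈ R1.dropLast.getLast?,
      ∀ y ∈ (pvMerged ((k, L), R1.getLast?, R2.head?) p c ++ R2.tail).head?, x.1 ≠ y.1 := by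
    cases hprev : R1.getLast? with
    | none =>
      have : R1 = [] := List.getLast?_eq_none_iff.mp hprev
      simp [this]
    | some a =>
      intro x hx y hy
      rw [← hprev] at hy
      have haR1 : a ∈ R1 := List.mem_of_mem_getLast? (by rw [hprev]; rfl)
      have ha : 0 < a.2 := hcanon.1 a (by simp [haR1])
      obtain ⟨m', hm⟩ : ∃ m', a.2 = m' + 1 := ⟨a.2 - 1, by omega⟩
      have hhead : (pvFlat (pvMerged ((k, L), R1.getLast?, R2.head?) p c)).head?
          = some a.1 := by
        rw [hmergedflat, hprev]
        simp [pvOptList, pvFlat, hm, List.replicate_succ]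
      rw [flat_head_fst _ hmerged_canon.1] at hhead
      rw [List.head?_append_of_ne_nil _ hmergedne] at hy
      rw [Option.mem_def] at hx hy
      rw [hy] at hhead
      simp at hhead
      rw [hhead]
      -- x is the last of R1.dropLast, adjacent to a in R1
      have hdec : R1.dropLast ++ [a] = R1 := List.dropLast_append_getLast? a hprev
      have := (List.isChain_append.mp (hdec ▸ hchainR1 : (R1.dropLast ++ [a]).IsChain _)).2.2
      exact this x hx a (by simp)
  have hWchain : (R1.dropLast ++ (pvMerged ((k, L), R1.getLast?, R2.head?) p c ++ R2.tail)).IsChain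
      (fun a b => a.1 ≠ b.1) := by
    refine List.isChain_append.mpr ⟨?_, ?_, hJ1⟩
    · exact hchainR1.prefix (List.dropLast_prefix R1)
    · refine List.isChain_append.mpr ⟨hmerged_canon.2, ?_, hJ2⟩
      exact hchainR2.suffix (List.tail_suffix R2)
  -- the reassembled run list flattens to the modified string
  have hWflat : pvFlat (R1.dropLast ++ (pvMerged ((k, L), R1.getLast?, R2.head?) p c ++ R2.tail))
      = (pvFlat (R1 ++ (k, L) :: R2)).set ((pvFlat R1).length + p) c := by
    have hsetrep : (List.replicate L k).set p c
        = List.replicate p k ++ c :: List.replicate (L - 1 - p) k := by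
      rw [List.set_eq_take_append_cons_drop, if_pos (by simpa using hp)]
      rw [List.take_replicate, List.drop_replicate]
      have h1 : min p L = p := by omega
      have h2 : L - (p + 1) = L - 1 - p := by omega
      rw [h1, h2]
    have hflatsplit : pvFlat (R1 ++ (k, L) :: R2)
        = pvFlat R1 ++ (List.replicate L k ++ pvFlat R2) := by
      rw [pvFlat_append]; simp [pvFlat]
    rw [hflatsplit, List.set_append, if_neg (by omega)]
    have hidx : (pvFlat R1).length + p - (pvFlat R1).length = p := by omega
    rw [hidx, List.set_append, if_pos (by simpa using hp), hsetrep]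
    calc pvFlat (R1.dropLast ++ (pvMerged ((k, L), R1.getLast?, R2.head?) p c ++ R2.tail))
        = pvFlat R1.dropLast ++ (pvFlat (pvMerged ((k, L), R1.getLast?, R2.head?) p c)
            ++ pvFlat R2.tail) := by rw [pvFlat_append, pvFlat_append]
      _ = pvFlat R1.dropLast ++ ((pvFlat (pvOptList R1.getLast?) ++
            (List.replicate p k ++ (c :: List.replicate (L - 1 - p) k ++
              pvFlat (pvOptList R2.head?)))) ++ pvFlat R2.tail) := by rw [hmergedflat]
      _ = (pvFlat R1.dropLast ++ pvFlat (pvOptList R1.getLast?)) ++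
            ((List.replicate p k ++ c :: List.replicate (L - 1 - p) k) ++
              (pvFlat (pvOptList R2.head?) ++ pvFlat R2.tail)) := by
            simp [List.append_assoc]
      _ = pvFlat R1 ++ ((List.replicate p k ++ c :: List.replicate (L - 1 - p) k) ++ pvFlat R2) := by
            rw [← pvFlat_append, hR1, ← pvFlat_append, hR2]
  -- put it together
  rw [← hWflat]
  have hWcanon : pvCanon (R1.dropLast ++ (pvMerged ((k, L), R1.getLast?, R2.head?) p c ++ R2.tail)) :=
    ⟨hWpos, hWchain⟩
  rw [compress_eq_cost _ hWcanon]
  -- cost bookkeeping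
  have e1 : pvCost (R1 ++ (k, L) :: R2)
      = pvCost R1.dropLast + pvCost (pvOptList R1.getLast?) + (1 + pvStrLen L)
        + pvCost (pvOptList R2.head?) + pvCost R2.tail := by
    conv_lhs => rw [← hR1, ← hR2]
    rw [pvCost_append, pvCost_append]
    simp [pvCost]
    ring
  rw [pvCost_append, pvCost_append, e1]
  unfold pvOldc
  rw [pvCost_append]
  ring

-- ---- min-fold shapes (same as in the A-side reduction) ----

theorem foldl_min_if {α : Type} (p : α → Prop) [DecidablePred p] (f : α → Int) :
    ∀ (xs : List α) (m : Int),
      xs.foldl (fun m x => if p x then min m (f x) else m) m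
        = ((xs.filter (fun x => decide (p x))).map f).foldl min m := by
  intro xs
  induction xs with
  | nil => intro m; simp
  | cons x rest ih =>
    intro m
    by_cases h : p x <;> simp [h, ih]

theorem foldl_min_flat {α : Type} (h : α → List Int) :
    ∀ (xs : List α) (m : Int),
      xs.foldl (fun m x => (h x).foldl min m) m = (xs.flatMap h).foldl min m := by
  intro xs
  induction xs with
  | nil => intro m; simp
  | cons x rest ih => intro m; simp [List.flatMap_cons, List.foldl_append, ih]

-- slicing around position i and inserting c is List.set
theorem slice_set (l : List Char) (k : Nat) (hk : k < l.length) (c : Char) :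
    PySem.List.slice l none (some (k : Int)) ++ [c] ++
      PySem.List.slice l (some ((k : Int) + 1)) none = l.set k c := by
  have h1 : PySem.List.slice l none (some (k : Int)) = l.take k :=
    PySem.List.slice_to_natCast l k
  have h2 : PySem.List.slice l (some ((k : Int) + 1)) none = l.drop (k + 1) := by
    have : ((k : Int) + 1) = ((k + 1 : Nat) : Int) := by push_cast; ring
    rw [this, PySem.List.slice_from_natCast]
  rw [h1, h2, List.set_eq_take_append_cons_drop, if_pos hk, List.append_assoc]
  rfl

-- A's per-position candidate list
def pvCandA (l : List Char) (i : Int) : List Int :=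
  (pvAlpha.filter (fun repl => decide (l.getD i.toNat 'a' ≠ repl))).map
    (fun repl => compress_length
      (PySem.List.slice l none (some i) ++ [repl] ++
       PySem.List.slice l (some (i + 1)) none))

-- B's per-triple, per-offset candidate list
def pvCandB (base : Int) (tr : (Char × Nat) × Option (Char × Nat) × Option (Char × Nat))
    (p : Nat) : List Int :=
  (pvAlpha.filter (fun c => decide (c ≠ tr.1.1))).map
    (fun c => base - pvOldc tr + pvCost (pvMerged tr p c))

-- ---- B's zip of runs with shifted neighbour lists, recursively ----

def pvTrips : Option (Char × Nat) → List (Char × Nat) →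
    List ((Char × Nat) × Option (Char × Nat) × Option (Char × Nat))
  | _, [] => []
  | pv, x :: rest => (x, pv, rest.head?) :: pvTrips (some x) rest

theorem zip_eq_trips : ∀ (R : List (Char × Nat)) (pv : Option (Char × Nat)),
    R.zip ((pv :: R.dropLast.map some).zip (R.tail.map some ++ [none])) = pvTrips pv R := by
  intro R
  induction R with
  | nil => intro pv; simp [pvTrips]
  | cons x rest ih =>
    intro pv
    cases rest with
    | nil => simp [pvTrips]
    | cons b t =>
      have h := ih (some x)
      simp only [pvTrips, List.dropLast, List.tail, List.map, List.zip_cons_cons,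
        List.cons_append, List.head?_cons] at h ⊢
      rw [h]

-- ---- the candidate lists of A and B coincide ----

theorem main_list (l : List Char) (base : Int) :
    ∀ (R2 R1 : List (Char × Nat)), pvCanon (R1 ++ R2) → l = pvFlat (R1 ++ R2) →
      base = pvCost (R1 ++ R2) →
      (PySem.List.pyRange ((pvFlat R1).length : Int) (l.length : Int) 1).flatMap (pvCandA l)
        = (pvTrips R1.getLast? R2).flatMap
            (fun tr => (List.range tr.1.2).flatMap (fun p => pvCandB base tr p)) := by
  intro R2
  induction R2 with
  | nil =>
    intro R1 hcanon hl hbase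
    have h0 : l.length = (pvFlat R1).length := by rw [hl]; simp
    rw [PySem.List.pyRange_one_eq_nil (a := ((pvFlat R1).length : Int))
      (b := (l.length : Int)) (by omega)]
    simp [pvTrips]
  | cons hd R2' ih =>
    intro R1 hcanon hl hbase
    obtain ⟨k, L⟩ := hd
    have hlsplit : l = pvFlat R1 ++ (List.replicate L k ++ pvFlat R2') := by
      rw [hl, pvFlat_append]; simp [pvFlat]
    have hllen : l.length = (pvFlat R1).length + L + (pvFlat R2').length := by
      rw [hlsplit]; simp; omega
    have hsplit : PySem.List.pyRange ((pvFlat R1).length : Int) (l.length : Int) 1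
        = PySem.List.pyRange ((pvFlat R1).length : Int) (((pvFlat R1).length : Int) + L) 1 ++
          PySem.List.pyRange (((pvFlat R1).length : Int) + L) (l.length : Int) 1 := by
      rw [PySem.List.pyRange_one_append ((pvFlat R1).length : Int)
        (((pvFlat R1).length : Int) + L) (l.length : Int) (by omega)
        (by rw [hllen]; push_cast; omega)]
    rw [hsplit, List.flatMap_append]
    -- the recursive part
    have hassoc : (R1 ++ [(k, L)]) ++ R2' = R1 ++ (k, L) :: R2' := by simp
    have hlen1 : (pvFlat (R1 ++ [(k, L)])).length = (pvFlat R1).length + L := by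
      rw [pvFlat_append]; simp [pvFlat]
    have hrec := ih (R1 ++ [(k, L)]) (by rw [hassoc]; exact hcanon)
      (by rw [hassoc]; exact hl) (by rw [hassoc]; exact hbase)
    rw [hlen1] at hrec
    have hlast : (R1 ++ [(k, L)]).getLast? = some (k, L) := List.getLast?_concat
    rw [hlast] at hrec
    have hcast : ((((pvFlat R1).length + L : Nat)) : Int)
        = ((pvFlat R1).length : Int) + L := by push_cast; ring
    rw [hcast] at hrec
    rw [hrec]
    -- the head block
    have hfirst : (PySem.List.pyRange ((pvFlat R1).length : Int)
          (((pvFlat R1).length : Int) + L) 1).flatMap (pvCandA l)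
        = (List.range L).flatMap
            (fun p => pvCandB base ((k, L), R1.getLast?, R2'.head?) p) := by
      rw [PySem.List.pyRange_one]
      have : ((((pvFlat R1).length : Int) + L) - ((pvFlat R1).length : Int)).toNat = L := by
        omega
      rw [this, List.flatMap_map]
      refine List.flatMap_congr ?_
      intro p hp
      have hpL : p < L := List.mem_range.mp hp
      have hiNat : (((pvFlat R1).length : Int) + p).toNat = (pvFlat R1).length + p := by omega
      have hilen : (pvFlat R1).length + p < l.length := by rw [hllen]; omega
      have hq : l[(pvFlat R1).length + p]? = some k := by
        rw [hlsplit]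
        rw [List.getElem?_append_right (by simp)]
        have h2 : (pvFlat R1).length + p - (pvFlat R1).length = p := by omega
        simp only [h2]
        rw [List.getElem?_append_left (by simpa using hpL)]
        simp [hpL]
      have hget : l.getD ((((pvFlat R1).length : Int) + p).toNat) 'a' = k := by
        rw [hiNat, List.getD_eq_getElem?_getD, hq]
        rfl
      unfold pvCandA pvCandB
      have hfilter : (fun repl => decide (l.getD ((((pvFlat R1).length : Int) + p).toNat) 'a'
            ≠ repl)) = (fun c2 : Char => decide (c2 ≠ k)) := by
        funext c2
        rw [hget]
        simp [ne_comm]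
      rw [hfilter]
      refine List.map_congr_left ?_
      intro c2 hc2
      have hcne : c2 ≠ k := by
        have := (List.mem_filter.mp hc2).2
        simpa using this
      have hcastI : ((pvFlat R1).length : Int) + p = (((pvFlat R1).length + p : Nat) : Int) := by
        push_cast; ring
      rw [hcastI, slice_set l ((pvFlat R1).length + p) hilen c2]
      rw [hl]
      rw [hbase]
      exact window R1 R2' k L c2 p hpL hcne hcanon
    rw [hfirst]
    simp [pvTrips]

-- the two ports compute the same value on every character list
theorem final_eq (l : List Char) :
    (PySem.List.pyRange 0 (l.length : Int) 1).foldl (fun m i =>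
      pvAlpha.foldl (fun m repl =>
        match PySem.List.pyGet? l i with
        | some ch =>
            if ch ≠ repl then
              min m (compress_length
                (PySem.List.slice l none (some i) ++ [repl] ++
                 PySem.List.slice l (some (i + 1)) none))
            else m
        | none => m) m) (compress_length l)
    =
    ((l.foldl pvPush []).zip
        ((none :: (l.foldl pvPush []).dropLast.map some).zip
          ((l.foldl pvPush []).tail.map some ++ [none]))).foldl (fun best tr =>
      (List.range tr.1.2).foldl (fun best p =>
        pvAlpha.foldl (fun best c =>
          if c ≠ tr.1.1 then
            min best (pvCost (l.foldl pvPush []) - pvOldc tr + pvCost (pvMerged tr p c))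
          else best) best) best) (pvCost (l.foldl pvPush [])) := by
  have hRc := runs_canon l
  have hRf := runs_flat l
  -- B side: running min over per-triple, per-offset candidate blocks
  rw [zip_eq_trips]
  have hBtr : ∀ (best : Int), ∀ tr ∈ pvTrips none (l.foldl pvPush []),
      (List.range tr.1.2).foldl (fun best p =>
        pvAlpha.foldl (fun best c =>
          if c ≠ tr.1.1 then
            min best (pvCost (l.foldl pvPush []) - pvOldc tr + pvCost (pvMerged tr p c))
          else best) best) best
      = ((List.range tr.1.2).flatMap
          (fun p => pvCandB (pvCost (l.foldl pvPush [])) tr p)).foldl min best := by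
    intro best tr _
    rw [PySem.List.foldl_congr_mem (List.range tr.1.2) _
      (fun best p => ((pvCandB (pvCost (l.foldl pvPush [])) tr p).foldl min best)) best
      (fun best p _ => by
        rw [foldl_min_if (fun c => c ≠ tr.1.1)
          (fun c => pvCost (l.foldl pvPush []) - pvOldc tr + pvCost (pvMerged tr p c))
          pvAlpha best]
        rfl)]
    exact foldl_min_flat _ (List.range tr.1.2) best
  rw [PySem.List.foldl_congr_mem (pvTrips none (l.foldl pvPush [])) _
    (fun best tr => ((List.range tr.1.2).flatMap
      (fun p => pvCandB (pvCost (l.foldl pvPush [])) tr p)).foldl min best) _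
    (fun best tr htr => hBtr best tr htr)]
  rw [foldl_min_flat (fun tr => (List.range tr.1.2).flatMap
      (fun p => pvCandB (pvCost (l.foldl pvPush [])) tr p)) (pvTrips none (l.foldl pvPush []))]
  -- A side: running min over per-position candidate blocks
  have hAin : ∀ (m : Int), ∀ i ∈ PySem.List.pyRange 0 (l.length : Int) 1,
      pvAlpha.foldl (fun m repl =>
        match PySem.List.pyGet? l i with
        | some ch =>
            if ch ≠ repl then
              min m (compress_length
                (PySem.List.slice l none (some i) ++ [repl] ++
                 PySem.List.slice l (some (i + 1)) none))
            else m
        | none => m) m = (pvCandA l i).foldl min m := by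
    intro m i hi
    obtain ⟨h0, h1⟩ := PySem.List.mem_pyRange_one.mp hi
    obtain ⟨j, rfl⟩ : ∃ j : Nat, i = (j : Int) := ⟨i.toNat, (Int.toNat_of_nonneg h0).symm⟩
    have hj : j < l.length := by exact_mod_cast h1
    have hget : PySem.List.pyGet? l (j : Int) = some l[j] := by
      rw [PySem.List.pyGet?_natCast, List.getElem?_eq_getElem hj]
    simp only [hget]
    rw [foldl_min_if (fun repl => l[j] ≠ repl) _ pvAlpha m]
    simp [pvCandA, List.getElem?_eq_getElem hj]
  rw [PySem.List.foldl_congr_mem (PySem.List.pyRange 0 (l.length : Int) 1) _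
      (fun m i => (pvCandA l i).foldl min m) (compress_length l)
      (fun m i hi => hAin m i hi)]
  rw [foldl_min_flat (pvCandA l) (PySem.List.pyRange 0 (l.length : Int) 1) (compress_length l)]
  -- same starting value, same candidate list
  have hstart : compress_length l = pvCost (l.foldl pvPush []) := by
    conv_lhs => rw [← hRf]
    exact compress_eq_cost _ hRc
  have hlists := main_list l (pvCost (l.foldl pvPush [])) (l.foldl pvPush []) []
    (by simpa using hRc) (by simpa using hRf.symm) (by simp)
  simp only [pvFlat, List.flatMap_nil, List.length_nil, Nat.cast_zero, List.getLast?_nil]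
    at hlists
  rw [hstart, hlists]

-- ===== VERDICT (by name: the statement is the Claim_ definition above) =====
theorem best_compression_spec : Claim_equal_best_compression := by
  intro s _
  simp only [Spec_best_compression, best_compression, best_compression_alt]
  exact final_eq s.toList
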